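-- pv_equiv track=rewrite | github.com/daniel-reich/turbo-robot | Wd9cCvFKC3fHzgqSx_24.py | num_split
-- ===== SOURCE A (Python) =====
-- def num_split(num):
--     s = []
--     i = len(str(abs(num)))
--     while i != 0:
--         if num > 0:
--             s.append(num//(10**(i-1))*(10**(i-1)))
--             num -= num//(10**(i-1))*(10**(i-1))
--             i -= 1
--         else:
--             s.append(-(abs(num) // (10 ** (i - 1)) * (10 ** (i - 1))))
--             num += abs(num) // (10 ** (i - 1)) * (10 ** (i - 1))
--             i -= 1
--     return s
-- ===== SOURCE B (Python) =====
-- def num_split(num):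
--     sign = -1 if num < 0 else 1
--     n = abs(num)
--     out = []
--     p = 1
--     while True:
--         n, d = divmod(n, 10)
--         out = [sign * d * p] + out
--         p *= 10
--         if n == 0:
--             return out
-- ===== Notes on version B (the rewrite author's own statement) =====
-- stated objective: simpler
-- what changed: B replaces A's top-down remainder loop (string-length counter, per-iteration sign branch, power of ten recomputed from the counter each pass, remainder subtraction) with a bottom-up divmod digit extraction that builds the list back-to-front with the sign applied once.
import Mathlib
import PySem

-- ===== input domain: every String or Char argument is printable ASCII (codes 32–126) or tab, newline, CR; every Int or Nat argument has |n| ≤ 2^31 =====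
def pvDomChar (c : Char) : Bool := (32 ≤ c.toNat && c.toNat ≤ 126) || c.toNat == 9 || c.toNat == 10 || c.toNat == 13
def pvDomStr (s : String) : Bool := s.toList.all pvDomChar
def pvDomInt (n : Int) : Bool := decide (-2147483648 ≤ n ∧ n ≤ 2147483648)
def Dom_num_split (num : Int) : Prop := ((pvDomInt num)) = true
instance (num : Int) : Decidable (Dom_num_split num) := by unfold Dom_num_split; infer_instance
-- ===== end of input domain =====

-- B extracts the digits of abs(num) low-to-high with divmod and a running power of ten,
-- building the list back-to-front with the sign applied once — no string length, no
-- per-iteration sign branch, no remainder threading (objective: simpler).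

-- ===== PORT A =====
-- literal port of A's while-loop: the counter i is the recursion fuel (A decrements i by 1
-- each pass and exits at i == 0); s.append(x) is s ++ [x]; Python // is PySem.Int.floordiv.
def numSplitLoop (num : Int) (i : Nat) (s : List Int) : List Int :=
  match i with
  | 0 => s
  | Nat.succ j =>
    if num > 0 then
      numSplitLoop (num - PySem.Int.floordiv num ((10:Int)^j) * (10:Int)^j) j
        (s ++ [PySem.Int.floordiv num ((10:Int)^j) * (10:Int)^j])
    else
      numSplitLoop (num + PySem.Int.floordiv |num| ((10:Int)^j) * (10:Int)^j) j
        (s ++ [-(PySem.Int.floordiv |num| ((10:Int)^j) * (10:Int)^j)])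


-- i = len(str(abs(num))): PySem.Str.len is a nonnegative Int, so .toNat is exact here
def num_split (num : Int) : List Int :=
  numSplitLoop num (PySem.Str.len (PySem.Int.toStr |num|)).toNat []

-- ===== PORT B =====
-- hand port of B's while-True loop: n = abs(num) is a nonnegative Python int carried as a
-- Nat, so divmod(n, 10) is exactly (n / 10, n % 10) on Nat; [x] + out is x :: out.
def numSplitAltGo (sign : Int) (n : Nat) (p : Int) (out : List Int) : List Int :=
  if _h : n / 10 = 0 then (sign * ((n % 10 : Nat) : Int) * p) :: out
  else numSplitAltGo sign (n / 10) (p * 10) ((sign * ((n % 10 : Nat) : Int) * p) :: out)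
termination_by n
decreasing_by omega


def num_split_alt (num : Int) : List Int :=
  numSplitAltGo (if num < 0 then -1 else 1) num.natAbs 1 []

-- ===== PRECONDITION & SPEC =====
def Spec_num_split (num : Int) (out : List Int) : Prop := out = num_split_alt num
instance (num : Int) (out : List Int) : Decidable (Spec_num_split num out) := by unfold Spec_num_split; infer_instance

-- ===== CLAIM (what is proved, stated in full; the proofs are below) =====
def Claim_equal_num_split : Prop := ∀ (num : Int), Dom_num_split num → Spec_num_split num (num_split num)

-- ===== LEMMAS AND PROOFS =====

def digitLen (m : Nat) : Nat :=
  if m < 10 then 1 else digitLen (m / 10) + 1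
termination_by m
decreasing_by omega

lemma lt_pow_digitLen (m : Nat) : m < 10 ^ digitLen m := by
  induction m using Nat.strong_induction_on with
  | _ m ih =>
    unfold digitLen
    split
    · simpa using by omega
    · have h := ih (m / 10) (by omega)
      have h2 : 10 ^ (digitLen (m / 10) + 1) = 10 ^ digitLen (m / 10) * 10 := pow_succ 10 _
      omega

lemma toDigitsCore_len : ∀ (f m : Nat) (acc : List Char), m < f →
    (Nat.toDigitsCore 10 f m acc).length = digitLen m + acc.length := by
  intro f
  induction f with
  | zero => intro m acc h; omega
  | succ f ih =>
    intro m acc h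
    rw [Nat.toDigitsCore]
    split
    · rw [digitLen]
      have : m < 10 := by omega
      simp [this]
      omega
    · rw [ih (m / 10) _ (by omega)]
      conv_rhs => rw [digitLen]
      have : ¬ m < 10 := by omega
      simp [this]
      omega

lemma len_str (num : Int) :
    (PySem.Str.len (PySem.Int.toStr |num|)).toNat = digitLen num.natAbs := by
  rw [PySem.Str.len_eq, PySem.Int.toList_toStr]
  have h : ¬ |num| < 0 := by simp [abs_nonneg]
  rw [PySem.Int.toChars]
  simp only [h, if_false]
  have h2 : |num|.toNat = num.natAbs := by rw [Int.abs_eq_natAbs]; exact Int.toNat_natCast _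
  rw [h2, Nat.toDigits, toDigitsCore_len _ _ _ (by omega)]
  simp

lemma numSplitAltGo_eq (m : Nat) : ∀ (sign : Int) (t : Nat) (out : List Int),
    numSplitAltGo sign m ((10:Int)^t) out
      = (List.range (digitLen m)).reverse.map
          (fun u => sign * ((m / 10^u % 10 : Nat) : Int) * (10:Int)^(u+t)) ++ out := by
  induction m using Nat.strong_induction_on with
  | _ m ih =>
    intro sign t out
    rw [numSplitAltGo]
    by_cases h : m / 10 = 0
    · have hd : digitLen m = 1 := by rw [digitLen]; simp [show m < 10 by omega]
      simp [h, hd, List.range_succ]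
    · have hd : digitLen m = digitLen (m / 10) + 1 := by
        conv_lhs => rw [digitLen]
        simp [show ¬ m < 10 by omega]
      have hp : (10:Int)^t * 10 = (10:Int)^(t+1) := (pow_succ 10 t).symm
      rw [dif_neg h, hp, ih (m / 10) (by omega) sign (t+1)]
      rw [hd, List.range_succ_eq_map]
      simp only [List.reverse_cons, List.map_reverse, List.map_append, List.map_map,
        List.map_cons, List.map_nil]
      rw [List.append_assoc]
      congr 1
      · congr 1
        apply List.map_congr_left
        intro u _
        simp only [Function.comp_apply, Nat.succ_eq_add_one]
        rw [Nat.div_div_eq_div_mul, ← pow_succ']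
        ring_nf
      · simp

def specA (sign : Int) : Nat → Nat → List Int
  | _, 0 => []
  | m, j+1 => (sign * ((m / 10^j : Nat) : Int) * (10:Int)^j) :: specA sign (m % 10^j) j

lemma numSplitLoop_eq_specA (j : Nat) : ∀ (m : Nat) (sign : Int) (s : List Int),
    sign = 1 ∨ sign = -1 →
    numSplitLoop (sign * (m : Int)) j s = s ++ specA sign m j := by
  induction j with
  | zero => intro m sign s _; simp [numSplitLoop, specA]
  | succ j ih =>
    intro m sign s hs
    have hcast : ((10:Int)^j) = ((10^j : Nat) : Int) := by push_cast; ring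
    have hfd : ∀ (m' : Nat), PySem.Int.floordiv (m' : Int) ((10:Int)^j) = ((m' / 10^j : Nat) : Int) := by
      intro m'; rw [hcast]; exact PySem.Int.floordiv_natCast m' (10^j)
    have harg : ∀ (m' : Nat), (m' : Int) - ((m' / 10^j : Nat) : Int) * ((10:Int)^j) = ((m' % 10^j : Nat) : Int) := by
      intro m'
      have h' : ((10^j : Nat) : Int) * ((m' / 10^j : Nat) : Int) + ((m' % 10^j : Nat) : Int) = (m' : Int) := by
        exact_mod_cast Nat.div_add_mod m' (10^j)
      rw [hcast]; linear_combination -h'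
    rcases hs with h1 | h1 <;> subst h1
    · by_cases hm : 0 < m
      · rw [numSplitLoop, if_pos (by omega)]
        simp only [one_mul]
        rw [hfd m, harg m]
        rw [show ((m % 10^j : Nat) : Int) = 1 * ((m % 10^j : Nat) : Int) from (one_mul _).symm]
        rw [ih (m % 10^j) 1 _ (Or.inl rfl)]
        simp [specA, List.append_assoc]
      · have hm0 : m = 0 := by omega
        subst hm0
        rw [numSplitLoop, if_neg (by norm_num)]
        have habs : |(1:Int) * ((0:Nat) : Int)| = ((0:Nat) : Int) := by norm_num
        rw [habs, hfd 0]
        norm_num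
        rw [show (0:Int) = 1 * ((0:Nat) : Int) by norm_num]
        rw [ih 0 1 _ (Or.inl rfl)]
        simp [specA, List.append_assoc]
    · rw [numSplitLoop, if_neg (by omega)]
      have habs : |(-1:Int) * (m : Int)| = (m : Int) := by
        rw [neg_one_mul, abs_neg, abs_of_nonneg (by positivity)]
      rw [habs, hfd m]
      have hnew : (-1:Int) * (m : Int) + ((m / 10^j : Nat) : Int) * ((10:Int)^j)
          = -1 * ((m % 10^j : Nat) : Int) := by linear_combination - harg m
      rw [hnew, ih (m % 10^j) (-1) _ (Or.inr rfl)]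
      simp [specA, List.append_assoc]
def closedSpec (sign : Int) (m : Nat) (j : Nat) : List Int :=
  (List.range j).reverse.map (fun t => sign * ((m / 10^t % 10 : Nat) : Int) * (10:Int)^t)

lemma digit_stable (m j t : Nat) (h : t < j) : m % 10^j / 10^t % 10 = m / 10^t % 10 := by
  obtain ⟨s, hs⟩ : ∃ s, j = t + (s+1) := ⟨j - t - 1, by omega⟩
  subst hs
  rw [pow_add, Nat.mod_mul_right_div_self]
  exact Nat.mod_mod_of_dvd _ (dvd_pow_self 10 (Nat.succ_ne_zero s))

lemma specA_eq_closedSpec : ∀ (j m : Nat) (sign : Int), m < 10^j →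
    specA sign m j = closedSpec sign m j := by
  intro j
  induction j with
  | zero => intro m sign _; simp [specA, closedSpec]
  | succ j ih =>
    intro m sign h
    have hpos : 0 < 10 ^ j := by positivity
    have hdiv : m / 10^j % 10 = m / 10^j := by
      apply Nat.mod_eq_of_lt
      rw [Nat.div_lt_iff_lt_mul hpos]
      calc m < 10^(j+1) := h
        _ = 10 * 10^j := by ring
    rw [specA, closedSpec, List.range_succ]
    simp only [List.reverse_append, List.reverse_singleton, List.singleton_append, List.map_cons]
    congr 1
    · rw [hdiv]
    · rw [ih (m % 10^j) sign (Nat.mod_lt _ hpos)]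
      unfold closedSpec
      apply List.map_congr_left
      intro t ht
      rw [digit_stable m j t (by simp at ht; omega)]


lemma loop_closed (sign : Int) (m : Nat) (hs : sign = 1 ∨ sign = -1) :
    numSplitLoop (sign * (m : Int)) (digitLen m) [] = closedSpec sign m (digitLen m) := by
  rw [numSplitLoop_eq_specA _ _ _ _ hs, specA_eq_closedSpec _ _ _ (lt_pow_digitLen m)]
  simp

lemma altGo_closed (sign : Int) (m : Nat) :
    numSplitAltGo sign m 1 [] = closedSpec sign m (digitLen m) := by
  rw [show (1:Int) = (10:Int)^0 by norm_num, numSplitAltGo_eq m sign 0 []]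
  simp [closedSpec]

-- ===== VERDICT (by name: the statement is the Claim_ definition above) =====
theorem num_split_spec : Claim_equal_num_split := by
  intro num _
  unfold Spec_num_split
  unfold num_split num_split_alt
  rw [len_str num, altGo_closed]
  by_cases hneg : num < 0
  · rw [if_pos hneg, ← loop_closed (-1) num.natAbs (Or.inr rfl)]
    congr 1
    omega
  · rw [if_neg hneg, ← loop_closed 1 num.natAbs (Or.inl rfl)]
    congr 1
    omega
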